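-- pv_equiv track=rewrite | github.com/peter-k-1972/linux-desktop-ai-chat | scripts/qa/test_inventory_rules.py | derive_test_type
-- ===== SOURCE A (Python) =====
-- MARKER_PRIORITY = [
--     "regression",
--     "contract",
--     "failure_mode",
--     "chaos",
--     "async_behavior",
--     "cross_layer",
--     "state_consistency",
--     "startup",
--     "golden_path",
--     "integration",
--     "smoke",
--     "live",
--     "ui",
--     "unit",
-- ]
--
-- def derive_test_type(markers: list[str], test_domain: str) -> tuple[str, str]:
--     """
--     test_type aus Marker-Priorität, Fallback test_domain.
--     Returns (test_type, inference_source).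
--     """
--     for m in MARKER_PRIORITY:
--         if m in markers:
--             return m, "discovered"
--     if test_domain in MARKER_PRIORITY:
--         return test_domain, "inferred"
--     if test_domain in ("root", "helpers"):
--         return "unknown", "inferred"
--     return test_domain if test_domain else "unknown", "inferred"
-- ===== SOURCE B (Python) =====
-- MARKER_PRIORITY = [
--     "regression",
--     "contract",
--     "failure_mode",
--     "chaos",
--     "async_behavior",
--     "cross_layer",
--     "state_consistency",
--     "startup",
--     "golden_path",
--     "integration",
--     "smoke",
--     "live",
--     "ui",
--     "unit",
-- ]
--
-- _RANK = {m: i for i, m in enumerate(MARKER_PRIORITY)}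
--
-- def derive_test_type(markers: list[str], test_domain: str) -> tuple[str, str]:
--     """Single pass over `markers`, tracking the marker with the smallest priority rank."""
--     best = None  # (rank, marker)
--     for m in markers:
--         r = _RANK.get(m)
--         if r is not None and (best is None or r < best[0]):
--             best = (r, m)
--     if best is not None:
--         return best[1], "discovered"
--     if test_domain in _RANK:
--         return test_domain, "inferred"
--     if test_domain in ("root", "helpers"):
--         return "unknown", "inferred"
--     return test_domain if test_domain else "unknown", "inferred"
-- ===== Notes on version B (the rewrite author's own statement) =====
-- stated objective: idiomatic
-- what changed: A scans the fixed MARKER_PRIORITY list testing membership in markers for each entry (a list scan per priority); B builds a marker->rank dict once and makes a single pass over the input markers tracking the minimum-rank marker, keeping A's fallback chain unchanged.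
import Mathlib
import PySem

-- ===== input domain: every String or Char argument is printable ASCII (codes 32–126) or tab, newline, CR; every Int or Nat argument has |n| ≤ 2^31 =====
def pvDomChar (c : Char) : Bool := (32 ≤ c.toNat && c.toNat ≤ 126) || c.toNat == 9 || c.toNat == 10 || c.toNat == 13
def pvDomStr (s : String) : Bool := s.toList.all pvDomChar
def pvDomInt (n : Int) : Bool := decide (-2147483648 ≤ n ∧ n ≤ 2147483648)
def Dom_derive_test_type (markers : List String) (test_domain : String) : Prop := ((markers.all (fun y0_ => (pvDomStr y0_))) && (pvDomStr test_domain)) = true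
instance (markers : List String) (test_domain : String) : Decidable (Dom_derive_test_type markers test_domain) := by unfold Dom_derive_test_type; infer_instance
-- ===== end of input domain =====

-- B replaces A's scan over the fixed priority list (membership test per marker) by a single pass
-- over the input markers with a precomputed marker→rank dict, tracking the minimum rank (idiomatic).


-- ===== PORT A =====
def MARKER_PRIORITY : List String :=
  ["regression", "contract", "failure_mode", "chaos", "async_behavior", "cross_layer",
   "state_consistency", "startup", "golden_path", "integration", "smoke", "live", "ui", "unit"]

-- A's `for m in MARKER_PRIORITY: if m in markers: return m` loop (early return = none/some)
def deriveLoopA (ps : List String) (markers : List String) : Option String :=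
  match ps with
  | [] => none
  | p :: rest => if p ∈ markers then some p else deriveLoopA rest markers

def derive_test_type (markers : List String) (test_domain : String) : String × String :=
  match deriveLoopA MARKER_PRIORITY markers with
  | some m => (m, "discovered")
  | none =>
    if test_domain ∈ MARKER_PRIORITY then (test_domain, "inferred")
    else if test_domain = "root" ∨ test_domain = "helpers" then ("unknown", "inferred")
    else (if test_domain ≠ "" then test_domain else "unknown", "inferred")

-- ===== PORT B =====
-- _RANK = {m: i for i, m in enumerate(MARKER_PRIORITY)}
def rankDict : PySem.Dict String Int :=
  PySem.Dict.ofList ((PySem.List.enumerate MARKER_PRIORITY).map (fun p => (p.2, p.1)))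

-- the body of B's `for m in markers` loop
def bStep (best : Option (Int × String)) (m : String) : Option (Int × String) :=
  match PySem.Dict.get? rankDict m with
  | none => best
  | some r =>
    match best with
    | none => some (r, m)
    | some b => if r < b.1 then some (r, m) else best

def derive_test_type_alt (markers : List String) (test_domain : String) : String × String :=
  match markers.foldl bStep none with
  | some b => (b.2, "discovered")
  | none =>
    if rankDict.contains test_domain then (test_domain, "inferred")
    else if test_domain = "root" ∨ test_domain = "helpers" then ("unknown", "inferred")
    else (if test_domain ≠ "" then test_domain else "unknown", "inferred")

-- ===== PRECONDITION & SPEC =====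
def Spec_derive_test_type (markers : List String) (test_domain : String) (out : String × String) : Prop := out = derive_test_type_alt markers test_domain
instance (markers : List String) (test_domain : String) (out : String × String) : Decidable (Spec_derive_test_type markers test_domain out) := by unfold Spec_derive_test_type; infer_instance

-- ===== CLAIM (what is proved, stated in full; the proofs are below) =====
def Claim_equal_derive_test_type : Prop := ∀ (markers : List String) (test_domain : String), Dom_derive_test_type markers test_domain → Spec_derive_test_type markers test_domain (derive_test_type markers test_domain)

-- ===== LEMMAS AND PROOFS =====

-- the rank dict is the index-of lookup into MARKER_PRIORITY
theorem rankDict_keys_aux : rankDict.keys = MARKER_PRIORITY := by decide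

theorem rankDict_get? (m : String) :
    rankDict.get? m = (PySem.List.index? MARKER_PRIORITY m).map (fun i => (i : Int)) := by
  rcases eq_or_ne m "regression" with h0 | h0
  · subst h0; decide
  rcases eq_or_ne m "contract" with h1 | h1
  · subst h1; decide
  rcases eq_or_ne m "failure_mode" with h2 | h2
  · subst h2; decide
  rcases eq_or_ne m "chaos" with h3 | h3
  · subst h3; decide
  rcases eq_or_ne m "async_behavior" with h4 | h4
  · subst h4; decide
  rcases eq_or_ne m "cross_layer" with h5 | h5
  · subst h5; decide
  rcases eq_or_ne m "state_consistency" with h6 | h6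
  · subst h6; decide
  rcases eq_or_ne m "startup" with h7 | h7
  · subst h7; decide
  rcases eq_or_ne m "golden_path" with h8 | h8
  · subst h8; decide
  rcases eq_or_ne m "integration" with h9 | h9
  · subst h9; decide
  rcases eq_or_ne m "smoke" with h10 | h10
  · subst h10; decide
  rcases eq_or_ne m "live" with h11 | h11
  · subst h11; decide
  rcases eq_or_ne m "ui" with h12 | h12
  · subst h12; decide
  rcases eq_or_ne m "unit" with h13 | h13
  · subst h13; decide
  have hnotmem : m ∉ MARKER_PRIORITY := by
    simp [MARKER_PRIORITY, h0, h1, h2, h3, h4, h5, h6, h7, h8, h9, h10, h11, h12, h13]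
  rw [(PySem.List.index?_eq_none_iff _ _).mpr hnotmem,
    (PySem.Dict.get?_eq_none_iff_contains _ _).mpr ?_]
  · rfl
  · rw [← Bool.not_eq_true, PySem.Dict.contains_iff_mem_keys, rankDict_keys_aux]
    exact hnotmem

-- B's fold over markers equals a min-fold over the list of (rank, marker) candidates
def minStep (best : Option (Int × String)) (c : Int × String) : Option (Int × String) :=
  match best with
  | none => some c
  | some b => if c.1 < b.1 then some c else best

def cands (markers : List String) : List (Int × String) :=
  markers.filterMap (fun m => (rankDict.get? m).map (fun r => (r, m)))

theorem foldl_bStep_eq (markers : List String) (acc : Option (Int × String)) :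
    markers.foldl bStep acc = (cands markers).foldl minStep acc := by
  rw [cands, List.foldl_filterMap]
  induction markers generalizing acc with
  | nil => rfl
  | cons m ms ih =>
    simp only [List.foldl_cons]
    rw [ih]
    congr 1
    simp only [bStep]
    cases rankDict.get? m <;> rfl

-- min-fold facts
theorem minfold_some (l : List (Int × String)) (acc : Int × String) :
    ∃ c', l.foldl minStep (some acc) = some c' ∧ (c' ∈ l ∨ c' = acc) ∧ c'.1 ≤ acc.1 ∧
      ∀ d ∈ l, c'.1 ≤ d.1 := by
  induction l generalizing acc with
  | nil => exact ⟨acc, rfl, Or.inr rfl, le_refl _, by simp⟩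
  | cons x xs ih =>
    simp only [List.foldl_cons, minStep]
    split
    · obtain ⟨c', h1, h2, h3, h4⟩ := ih x
      refine ⟨c', h1, ?_, ?_, ?_⟩
      · rcases h2 with h | h
        · exact Or.inl (List.mem_cons_of_mem _ h)
        · exact Or.inl (h ▸ List.mem_cons_self)
      · omega
      · intro d hd
        rcases List.mem_cons.mp hd with h | h
        · subst h; exact h3
        · exact h4 d h
    · obtain ⟨c', h1, h2, h3, h4⟩ := ih acc
      refine ⟨c', h1, ?_, h3, ?_⟩
      · rcases h2 with h | h
        · exact Or.inl (List.mem_cons_of_mem _ h)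
        · exact Or.inr h
      · intro d hd
        rcases List.mem_cons.mp hd with h | h
        · subst h; omega
        · exact h4 d h

theorem minfold_none_iff (l : List (Int × String)) :
    l.foldl minStep none = none ↔ l = [] := by
  cases l with
  | nil => simp
  | cons x xs =>
    simp only [List.foldl_cons]
    constructor
    · intro h
      obtain ⟨c', h1, _⟩ := minfold_some xs x
      rw [show minStep none x = some x from rfl, h1] at h
      exact absurd h (by simp)
    · intro h; cases h

-- A's loop characterisations
theorem loopA_eq_none (ps markers : List String) (h : ∀ p ∈ ps, p ∉ markers) :
    deriveLoopA ps markers = none := by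
  induction ps with
  | nil => rfl
  | cons p rest ih =>
    rw [deriveLoopA, if_neg (h p List.mem_cons_self)]
    exact ih (fun q hq => h q (List.mem_cons_of_mem _ hq))

theorem loopA_eq_some (ps markers : List String) (i : Nat) (hi : i < ps.length)
    (hmem : ps[i] ∈ markers) (hmin : ∀ j (hj : j < i), ps[j]'(by omega) ∉ markers) :
    deriveLoopA ps markers = some ps[i] := by
  induction ps generalizing i with
  | nil => simp at hi
  | cons p rest ih =>
    cases i with
    | zero =>
      simp only [List.getElem_cons_zero] at hmem
      rw [deriveLoopA, if_pos hmem]; rfl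
    | succ n =>
      have hp : p ∉ markers := by
        have := hmin 0 (Nat.succ_pos n)
        simpa using this
      rw [deriveLoopA, if_neg hp]
      simp only [List.getElem_cons_succ] at hmem ⊢
      exact ih n (by simpa using hi) hmem
        (fun j hj => by
          have := hmin (j + 1) (by omega)
          simpa using this)

-- index? of an element occurring at position j is at most j
theorem index?_le_of_getElem (ps : List String) (j : Nat) (hj : j < ps.length) (i : Nat)
    (h : PySem.List.index? ps (ps[j]) = some i) : i ≤ j := by
  by_contra hgt
  obtain ⟨_, _, hne⟩ := PySem.List.getElem_of_index?_eq_some h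
  exact hne j (by omega) rfl

theorem cands_min (markers : List String) (c : Int × String)
    (hm : (cands markers).foldl minStep none = some c) :
    c ∈ cands markers ∧ ∀ d ∈ cands markers, c.1 ≤ d.1 := by
  cases hc : cands markers with
  | nil => rw [hc] at hm; cases hm
  | cons x xs =>
    rw [hc, List.foldl_cons] at hm
    obtain ⟨c', h1, h2, h3, h4⟩ := minfold_some xs x
    rw [show minStep none x = some x from rfl, h1] at hm
    obtain rfl : c' = c := by injection hm
    constructor
    · rcases h2 with h | h
      · exact List.mem_cons_of_mem _ h
      · exact h ▸ List.mem_cons_self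
    · intro d hd
      rcases List.mem_cons.mp hd with h | h
      · subst h; exact h3
      · exact h4 d h

theorem mem_cands_of (markers : List String) (m : String) (i : Nat)
    (hmm : m ∈ markers) (hidx : PySem.List.index? MARKER_PRIORITY m = some i) :
    ((i : Int), m) ∈ cands markers := by
  refine List.mem_filterMap.mpr ⟨m, hmm, ?_⟩
  rw [rankDict_get?, hidx]; rfl

theorem main_eq' (markers : List String) (t : String) :
    derive_test_type markers t = derive_test_type_alt markers t := by
  cases hf : markers.foldl bStep none with
  | none =>
    have hcands : cands markers = [] :=
      (minfold_none_iff _).mp (by rw [← foldl_bStep_eq]; exact hf)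
    have hA : deriveLoopA MARKER_PRIORITY markers = none := by
      apply loopA_eq_none
      intro p hp hpm
      obtain ⟨i, hi⟩ := Option.isSome_iff_exists.mp
        ((PySem.List.index?_isSome_iff _ _).mpr hp)
      have := mem_cands_of markers p i hpm hi
      rw [hcands] at this
      exact absurd this (List.not_mem_nil)
    have hcd : (rankDict.contains t = true) ↔ t ∈ MARKER_PRIORITY := by
      rw [PySem.Dict.contains_iff_mem_keys, rankDict_keys_aux]
    simp only [derive_test_type, derive_test_type_alt, hf, hA]
    by_cases hmem : t ∈ MARKER_PRIORITY
    · rw [if_pos hmem, if_pos (hcd.mpr hmem)]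
    · rw [if_neg hmem, if_neg (fun h => hmem (hcd.mp h))]
  | some c =>
    obtain ⟨hcm, hmin⟩ := cands_min markers c (by rw [← foldl_bStep_eq]; exact hf)
    obtain ⟨m, hmm, hg⟩ := List.mem_filterMap.mp hcm
    rw [rankDict_get?] at hg
    cases hidx : PySem.List.index? MARKER_PRIORITY m with
    | none => rw [hidx] at hg; cases hg
    | some i =>
      rw [hidx] at hg
      obtain rfl : ((i : Int), m) = c := by injection hg
      obtain ⟨hi, hget, _⟩ := PySem.List.getElem_of_index?_eq_some hidx
      have hA : deriveLoopA MARKER_PRIORITY markers = some (MARKER_PRIORITY[i]) := by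
        apply loopA_eq_some MARKER_PRIORITY markers i hi (hget ▸ hmm)
        intro j hj hjm
        have hjlen : j < MARKER_PRIORITY.length := by omega
        obtain ⟨i₂, hi₂⟩ := Option.isSome_iff_exists.mp
          ((PySem.List.index?_isSome_iff _ _).mpr (MARKER_PRIORITY.getElem_mem hjlen))
        have hle : ((i : Int)) ≤ ((i₂ : Int)) :=
          hmin _ (mem_cands_of markers _ i₂ hjm hi₂)
        have := index?_le_of_getElem MARKER_PRIORITY j hjlen i₂ hi₂
        omega
      simp only [derive_test_type, derive_test_type_alt, hf, hA, hget]

-- ===== VERDICT (by name: the statement is the Claim_ definition above) =====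
theorem derive_test_type_spec : Claim_equal_derive_test_type := by
  intro markers test_domain _
  unfold Spec_derive_test_type
  exact main_eq' markers test_domain
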